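-- pv_equiv track=rewrite | github.com/andrewfurman/PlanDocs | documents/create_sections_using_flags.py | identify_initial_sections
-- ===== SOURCE A (Python) =====
-- def identify_initial_sections(summaries):
--     """Group pages into initial sections based on flags."""
--     sections = []
--     current_section = []
--
--     for page in summaries:
--         if page['start_of_new_section']:
--             if page['content_continued_from_previous_page'] and current_section:
--                 current_section.append(page)
--             else:
--                 if current_section:
--                     sections.append(current_section)
--                 current_section = [page]
--         else:
--             current_section.append(page)
--
--     if current_section:
--         sections.append(current_section)
--
--     return sections
-- ===== SOURCE B (Python) =====
-- def _is_boundary(page):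
--     return page['start_of_new_section'] and not page['content_continued_from_previous_page']
--
--
-- def identify_initial_sections(summaries):
--     """Group pages into initial sections based on flags.
--
--     Two staged passes: first build the table of boundary indices (0 plus
--     every later page that starts a new, non-continued section), then slice
--     summaries between consecutive boundaries.
--     """
--     if not summaries:
--         return []
--     n = len(summaries)
--     bounds = [0] + [i for i in range(1, n) if _is_boundary(summaries[i])]
--     ends = bounds[1:] + [n]
--     return [summaries[b:e] for b, e in zip(bounds, ends)]
-- ===== Notes on version B (the rewrite author's own statement) =====
-- stated objective: alternative
-- what changed: Replaces A's single accumulate-and-flush buffer loop with two staged passes: first build the table of boundary indices (0 plus each later page with start_of_new_section and not content_continued_from_previous_page), then slice summaries between consecutive boundaries.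
import Mathlib
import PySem

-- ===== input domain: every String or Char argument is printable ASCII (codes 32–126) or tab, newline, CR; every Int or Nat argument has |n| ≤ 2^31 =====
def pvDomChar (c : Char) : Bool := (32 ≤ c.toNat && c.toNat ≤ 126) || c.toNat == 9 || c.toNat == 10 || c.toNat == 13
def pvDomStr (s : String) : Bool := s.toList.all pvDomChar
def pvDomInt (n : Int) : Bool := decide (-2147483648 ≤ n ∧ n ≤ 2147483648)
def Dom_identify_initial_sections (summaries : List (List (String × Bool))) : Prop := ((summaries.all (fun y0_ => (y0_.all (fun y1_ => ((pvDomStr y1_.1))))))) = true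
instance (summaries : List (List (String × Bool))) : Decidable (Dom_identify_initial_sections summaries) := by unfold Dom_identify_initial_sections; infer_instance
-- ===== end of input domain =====

-- B builds a boundary-index table (0 plus each later non-continued section start) and slices
-- between consecutive boundaries, instead of A's accumulate-and-flush buffer; same cost.


-- ===== PORT A =====
-- A's loop body: start_of_new_section / content_continued_from_previous_page are dict
-- lookups; under Pre_ they are present exactly where Python reads them, so getD false is exact.
def pvStepA (acc : List (List (List (String × Bool))) × List (List (String × Bool)))
    (page : List (String × Bool)) :
    List (List (List (String × Bool))) × List (List (String × Bool)) :=
  if (PySem.Dict.get? (PySem.Dict.mk page) "start_of_new_section").getD false then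
    if ((PySem.Dict.get? (PySem.Dict.mk page) "content_continued_from_previous_page").getD false) && !acc.2.isEmpty then
      (acc.1, acc.2 ++ [page])
    else
      ((if acc.2.isEmpty then acc.1 else acc.1 ++ [acc.2]), [page])
  else (acc.1, acc.2 ++ [page])

def identify_initial_sections (summaries : List (List (String × Bool))) : List (List (List (String × Bool))) :=
  let st := summaries.foldl pvStepA ([], [])
  if st.2.isEmpty then st.1 else st.1 ++ [st.2]

-- ===== PORT B =====
-- Source B's _is_boundary(page); 'and not' short-circuits, so getD false is exact under Pre_.
def pvIsBoundary (page : List (String × Bool)) : Bool :=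
  ((PySem.Dict.get? (PySem.Dict.mk page) "start_of_new_section").getD false)
    && !((PySem.Dict.get? (PySem.Dict.mk page) "content_continued_from_previous_page").getD false)

-- the comprehension indexes summaries[i] with 1 ≤ i < n, so the .getD [] default is never read
def identify_initial_sections_alt (summaries : List (List (String × Bool))) : List (List (List (String × Bool))) :=
  if summaries.isEmpty then [] else
    let n : Int := (summaries.length : Int)
    let bounds : List Int :=
      0 :: (PySem.List.pyRange 1 n 1).filter
        (fun i => pvIsBoundary ((PySem.List.pyGet? summaries i).getD []))
    let ends : List Int := bounds.drop 1 ++ [n]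
    (bounds.zip ends).map (fun be => PySem.List.slice summaries (some be.1) (some be.2))

-- ===== PRECONDITION & SPEC =====
-- Pre_ excludes exactly the inputs on which Python A raises KeyError: a page without the
-- 'start_of_new_section' key, or with it true but without 'content_continued_from_previous_page'.
def Pre_identify_initial_sections (summaries : List (List (String × Bool))) : Prop :=
  ∀ page ∈ summaries,
    (PySem.Dict.get? (PySem.Dict.mk page) "start_of_new_section").isSome = true ∧
    (PySem.Dict.get? (PySem.Dict.mk page) "start_of_new_section" = some true →
      (PySem.Dict.get? (PySem.Dict.mk page) "content_continued_from_previous_page").isSome = true)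
instance (summaries : List (List (String × Bool))) : Decidable (Pre_identify_initial_sections summaries) := by unfold Pre_identify_initial_sections; infer_instance

def pvWitness_identify_initial_sections : (List (List (String × Bool))) :=
  [[("start_of_new_section", true), ("content_continued_from_previous_page", false)],
   [("start_of_new_section", false)]]

def Spec_identify_initial_sections (summaries : List (List (String × Bool))) (out : List (List (List (String × Bool)))) : Prop := out = identify_initial_sections_alt summaries
instance (summaries : List (List (String × Bool))) (out : List (List (List (String × Bool)))) : Decidable (Spec_identify_initial_sections summaries out) := by unfold Spec_identify_initial_sections; infer_instance

-- ===== CLAIM (what is proved, stated in full; the proofs are below) =====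
def Claim_equal_identify_initial_sections : Prop := ∀ (summaries : List (List (String × Bool))), Dom_identify_initial_sections summaries → Pre_identify_initial_sections summaries → Spec_identify_initial_sections summaries (identify_initial_sections summaries)

-- ===== LEMMAS AND PROOFS =====

-- Proof-side middleman: a right fold closing a section at each boundary page.
-- A is shown equal to it by the invariant pv_main; B by pvBcore and slice arithmetic.
def pvStepB (page : List (String × Bool))
    (acc : List (List (List (String × Bool))) × List (List (String × Bool))) :
    List (List (List (String × Bool))) × List (List (String × Bool)) :=
  if pvIsBoundary page then ((page :: acc.2) :: acc.1, []) else (acc.1, page :: acc.2)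

-- boundary indices into ps (Nat level)
def pvBn (ps : List (List (String × Bool))) : List Nat :=
  (List.range ps.length).filter (fun k => pvIsBoundary (ps.getD k []))

-- A-side invariant: running A's loop with a nonempty current section `cur` over `l`
-- prepends `cur` to the leading run of the right-fold state on `l`.
theorem pv_main (l : List (List (String × Bool)))
    (secs : List (List (List (String × Bool)))) (cur : List (List (String × Bool)))
    (hcur : cur ≠ []) :
    (let st := l.foldl pvStepA (secs, cur);
      if st.2.isEmpty then st.1 else st.1 ++ [st.2])
    = secs ++ ((cur ++ (l.foldr pvStepB ([], [])).2) :: (l.foldr pvStepB ([], [])).1) := by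
  induction l generalizing secs cur with
  | nil => simp [hcur]
  | cons p ps ih =>
    simp only [List.foldl_cons, List.foldr_cons]
    by_cases hcut : pvIsBoundary p = true
    · have hA : pvStepA (secs, cur) p = (secs ++ [cur], [p]) := by
        unfold pvIsBoundary at hcut
        simp only [Bool.and_eq_true, Bool.not_eq_true'] at hcut
        simp [pvStepA, hcut.1, hcut.2, hcur]
      have hB : pvStepB p (List.foldr pvStepB ([], []) ps)
          = ((p :: (List.foldr pvStepB ([], []) ps).2) :: (List.foldr pvStepB ([], []) ps).1, []) := by
        simp [pvStepB, hcut]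
      rw [hA, hB, ih _ _ (by simp)]
      simp
    · have hA : pvStepA (secs, cur) p = (secs, cur ++ [p]) := by
        cases hs : (((PySem.Dict.mk p).get? "start_of_new_section").getD false) with
        | false => simp [pvStepA, hs]
        | true =>
          have hc : ((PySem.Dict.mk p).get? "content_continued_from_previous_page").getD false = true := by
            unfold pvIsBoundary at hcut
            simpa [hs] using hcut
          simp [pvStepA, hs, hc, hcur]
      have hB : pvStepB p (List.foldr pvStepB ([], []) ps)
          = ((List.foldr pvStepB ([], []) ps).1, p :: (List.foldr pvStepB ([], []) ps).2) := by
        simp [pvStepB, hcut]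
      rw [hA, hB, ih _ _ (by simp)]
      simp

theorem pvA_eq_mid (summaries : List (List (String × Bool))) :
    identify_initial_sections summaries
    = (match summaries with
       | [] => []
       | p :: ps =>
         (p :: (ps.foldr pvStepB ([], [])).2) :: (ps.foldr pvStepB ([], [])).1) := by
  cases summaries with
  | nil => rfl
  | cons p ps =>
    unfold identify_initial_sections
    simp only [List.foldl_cons]
    have h1 : pvStepA ([], []) p = ([], [p]) := by
      unfold pvStepA
      cases hs : (PySem.Dict.get? (PySem.Dict.mk p) "start_of_new_section").getD false <;> simp
    rw [h1, pv_main ps [] [p] (by simp)]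
    simp

theorem pvBn_cons (x : List (String × Bool)) (ps : List (List (String × Bool))) :
    pvBn (x :: ps) = (if pvIsBoundary x then [0] else []) ++ (pvBn ps).map (· + 1) := by
  simp only [pvBn, List.length_cons, List.range_succ_eq_map, List.filter_cons,
    List.getD_cons_zero, List.filter_map]
  by_cases h : pvIsBoundary x = true <;>
    simp [h, Function.comp_def, Nat.succ_eq_add_one]

-- shifting every Nat bound by one skips the head of the sliced list
theorem pvZipShift (x : List (String × Bool)) (ps : List (List (String × Bool)))
    (l r : List Nat) :
    ((l.map (· + 1)).zip (r.map (· + 1))).map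
        (fun be => ((x :: ps).drop be.1).take (be.2 - be.1))
      = (l.zip r).map (fun be => (ps.drop be.1).take (be.2 - be.1)) := by
  rw [List.zip_map, List.map_map]
  apply List.map_congr_left
  intro be _
  simp only [Function.comp_def, Prod.map, List.drop_succ_cons]
  congr 1
  omega

-- B's Int slice bounds are casts of Nat bounds shifted by one
theorem pvZipSliceCast (p : List (String × Bool)) (ps : List (List (String × Bool)))
    (l r : List Nat) :
    ((l.map (fun k => ((k + 1 : Nat) : Int))).zip (r.map (fun k => ((k + 1 : Nat) : Int)))).map
        (fun be => PySem.List.slice (p :: ps) (some be.1) (some be.2))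
      = (l.zip r).map (fun be => (ps.drop be.1).take (be.2 - be.1)) := by
  rw [List.zip_map, List.map_map]
  apply List.map_congr_left
  intro be _
  simp only [Function.comp_def, Prod.map]
  rw [PySem.List.slice_natCast]
  simp only [List.drop_succ_cons]
  congr 1
  omega

-- the right-fold state, characterised by the boundary indices and Nat slicing
theorem pvBcore (ps : List (List (String × Bool))) :
    (ps.foldr pvStepB ([], [])).2 = ps.take ((pvBn ps).headD ps.length) ∧
    (ps.foldr pvStepB ([], [])).1 =
      ((pvBn ps).zip ((pvBn ps).drop 1 ++ [ps.length])).map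
        (fun be => (ps.drop be.1).take (be.2 - be.1)) := by
  induction ps with
  | nil => simp [pvBn]
  | cons x ps ih =>
    rw [List.foldr_cons]
    obtain ⟨ih2, ih1⟩ := ih
    by_cases h : pvIsBoundary x = true
    · have hB : pvStepB x (ps.foldr pvStepB ([], []))
          = ((x :: (ps.foldr pvStepB ([], [])).2) :: (ps.foldr pvStepB ([], [])).1, []) := by
        simp [pvStepB, h]
      rw [hB, pvBn_cons, if_pos h]
      refine ⟨by simp, ?_⟩
      cases hbs : pvBn ps with
      | nil =>
        rw [hbs] at ih1 ih2
        simp only [List.headD_nil, List.zip_nil_left, List.map_nil] at ih1 ih2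
        simp [ih1, ih2, List.take_of_length_le]
      | cons b bs =>
        rw [hbs] at ih1 ih2
        simp only [List.headD_cons, List.drop_succ_cons, List.drop_zero] at ih1 ih2
        simp only [List.map_cons, List.cons_append, List.nil_append, List.length_cons,
          List.drop_one, List.tail_cons, List.zip_cons_cons, List.map_cons]
        rw [List.cons.injEq]
        constructor
        · simp [ih2]
        · rw [ih1,
            show (b + 1) :: List.map (· + 1) bs = List.map (· + 1) (b :: bs) from rfl,
            show List.map (· + 1) bs ++ [ps.length + 1] = List.map (· + 1) (bs ++ [ps.length]) by simp,
            pvZipShift]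
    · have hB : pvStepB x (ps.foldr pvStepB ([], []))
          = ((ps.foldr pvStepB ([], [])).1, x :: (ps.foldr pvStepB ([], [])).2) := by
        simp [pvStepB, h]
      rw [hB, pvBn_cons, if_neg h]
      refine ⟨?_, ?_⟩
      · cases hbs : pvBn ps with
        | nil => rw [hbs] at ih2; simp only [List.headD_nil] at ih2; simp [ih2]
        | cons b bs => rw [hbs] at ih2; simp only [List.headD_cons] at ih2; simp [ih2]
      · rw [ih1]
        simp only [List.nil_append, List.length_cons]
        rw [show List.drop 1 (List.map (· + 1) (pvBn ps))
              = List.map (· + 1) (List.drop 1 (pvBn ps)) from Eq.symm List.map_drop,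
          show List.map (· + 1) (List.drop 1 (pvBn ps)) ++ [ps.length + 1]
              = List.map (· + 1) (List.drop 1 (pvBn ps) ++ [ps.length]) by simp,
          pvZipShift]

-- B's Int bounds are the casts of the Nat boundary table
theorem pvAlt_bounds (p : List (String × Bool)) (ps : List (List (String × Bool))) :
    (PySem.List.pyRange 1 ((p :: ps).length : Int) 1).filter
        (fun i => pvIsBoundary ((PySem.List.pyGet? (p :: ps) i).getD []))
      = (pvBn ps).map (fun k => ((k + 1 : Nat) : Int)) := by
  rw [PySem.List.pyRange_one]
  have hlen : (((p :: ps).length : Int) - 1).toNat = ps.length := by simp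
  rw [hlen, List.filter_map, pvBn,
    show (fun k : Nat => 1 + (k : Int)) = (fun k : Nat => ((k + 1 : Nat) : Int)) from
      funext fun k => by push_cast; ring]
  congr 1
  apply List.filter_congr
  intro k hk
  simp only [Function.comp_def]
  rw [PySem.List.pyGet?_natCast, List.getElem?_cons_succ]
  simp only [List.mem_range] at hk
  rw [List.getElem?_eq_getElem hk, List.getD_eq_getElem ps [] hk]
  rfl

theorem pvAlt_eq_mid (summaries : List (List (String × Bool))) :
    identify_initial_sections_alt summaries
    = (match summaries with
       | [] => []
       | p :: ps =>
         (p :: (ps.foldr pvStepB ([], [])).2) :: (ps.foldr pvStepB ([], [])).1) := by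
  cases summaries with
  | nil => rfl
  | cons p ps =>
    obtain ⟨h2, h1⟩ := pvBcore ps
    unfold identify_initial_sections_alt
    rw [if_neg (by simp)]
    simp only []
    rw [pvAlt_bounds]
    have hn : ((p :: ps).length : Int) = ((ps.length + 1 : Nat) : Int) := by simp
    cases hbs : pvBn ps with
    | nil =>
      rw [hbs] at h1 h2
      simp only [List.headD_nil, List.zip_nil_left, List.map_nil] at h1 h2
      simp only [List.map_nil, List.drop_one, List.tail_cons, List.nil_append,
        List.zip_cons_cons, List.zip_nil_right, List.map_cons, List.map_nil, hn]
      rw [show (0 : Int) = ((0 : Nat) : Int) by simp, PySem.List.slice_natCast]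
      simp [h1, h2, List.take_of_length_le]
    | cons b bs =>
      rw [hbs] at h1 h2
      simp only [List.headD_cons, List.drop_succ_cons, List.drop_zero] at h1 h2
      simp only [List.map_cons, hn, List.drop_one, List.tail_cons, List.cons_append,
        List.zip_cons_cons, List.map_cons]
      rw [List.cons.injEq]
      constructor
      · rw [show (0 : Int) = ((0 : Nat) : Int) by simp, PySem.List.slice_natCast]
        simp [h2]
      · rw [h1,
          show ((((b + 1 : Nat) : Int)) :: List.map (fun k => ((k + 1 : Nat) : Int)) bs)
              = List.map (fun k => ((k + 1 : Nat) : Int)) (b :: bs) from rfl,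
          show List.map (fun k => ((k + 1 : Nat) : Int)) bs ++ [((ps.length + 1 : Nat) : Int)]
              = List.map (fun k => ((k + 1 : Nat) : Int)) (bs ++ [ps.length]) by simp,
          pvZipSliceCast]

-- ===== VERDICT (by name: the statement is the Claim_ definition above) =====
theorem identify_initial_sections_spec : Claim_equal_identify_initial_sections := by
  intro summaries _ _
  unfold Spec_identify_initial_sections
  rw [pvA_eq_mid, pvAlt_eq_mid]
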